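-- pv_equiv track=rewrite | github.com/great-history/gui-rixs | edrixs/utils.py | case_to_shell_name
-- ===== SOURCE A (Python) =====
-- def case_to_shell_name(case):
--
--     shell = ['s', 'p', 'p12', 'p32', 't2g', 'd', 'd32', 'd52', 'f', 'f52', 'f72']
--
--     shell_name = {}
--     for str1 in shell:
--         shell_name[str1] = (str1,)
--
--     for str1 in shell:
--         for str2 in shell:
--             shell_name[str1+str2] = (str1, str2)
--
--     return shell_name[case.strip()]
-- ===== SOURCE B (Python) =====
-- _SHELLS = frozenset(['s', 'p', 'p12', 'p32', 't2g', 'd', 'd32', 'd52', 'f', 'f52', 'f72'])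
--
--
-- def case_to_shell_name(case):
--     s = case.strip()
--     if s in _SHELLS:
--         return (s,)
--     for i in range(1, len(s)):
--         if s[:i] in _SHELLS and s[i:] in _SHELLS:
--             return (s[:i], s[i:])
--     raise KeyError(s)
-- ===== Notes on version B (the rewrite author's own statement) =====
-- stated objective: faster
-- what changed: B parses the stripped string directly (set membership for a single token, then a scan over split points for a token pair) instead of precomputing a 132-entry dict of all single and double shell names on every call.
import Mathlib
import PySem

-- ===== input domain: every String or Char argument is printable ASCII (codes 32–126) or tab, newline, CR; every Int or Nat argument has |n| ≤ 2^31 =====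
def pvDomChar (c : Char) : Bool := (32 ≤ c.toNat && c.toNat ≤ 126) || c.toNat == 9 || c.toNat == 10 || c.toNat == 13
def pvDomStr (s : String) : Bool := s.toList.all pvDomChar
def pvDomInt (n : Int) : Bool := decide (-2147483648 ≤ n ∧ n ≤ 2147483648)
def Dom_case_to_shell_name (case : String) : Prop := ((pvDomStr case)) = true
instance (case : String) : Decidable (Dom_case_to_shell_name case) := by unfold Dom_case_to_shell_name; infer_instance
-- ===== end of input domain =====

-- B parses the stripped key directly (set membership, then a scan over split points)
-- instead of building the full 132-entry single+double lookup dict on every call.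

-- ===== PORT A =====
def case_to_shell_name (case : String) : List String :=
  let shell : List String := ["s", "p", "p12", "p32", "t2g", "d", "d32", "d52", "f", "f52", "f72"]
  let d0 : PySem.Dict String (List String) :=
    shell.foldl (fun d str1 => d.insert str1 [str1]) PySem.Dict.empty
  let d1 : PySem.Dict String (List String) :=
    shell.foldl (fun d str1 =>
      shell.foldl (fun d str2 => d.insert (str1 ++ str2) [str1, str2]) d) d0
  -- shell_name[case.strip()]: KeyError (none) is excluded by Pre_
  (d1.get? (PySem.Str.strip case)).getD []

-- ===== PORT B =====
def pvShellSet : PySem.Set String :=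
  PySem.Set.ofList ["s", "p", "p12", "p32", "t2g", "d", "d32", "d52", "f", "f52", "f72"]

-- B's body after `s = case.strip()`: single token, else first valid split, else KeyError
def pvParse (s : String) : List String :=
  if PySem.Set.contains pvShellSet s then [s]
  else
    match (PySem.List.pyRange 1 (PySem.Str.len s) 1).find? (fun i =>
        PySem.Set.contains pvShellSet (PySem.Str.slice s none (some i)) &&
        PySem.Set.contains pvShellSet (PySem.Str.slice s (some i) none)) with
    | some i => [PySem.Str.slice s none (some i), PySem.Str.slice s (some i) none]
    | none => []  -- raise KeyError(s): excluded by Pre_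

def case_to_shell_name_alt (case : String) : List String :=
  pvParse (PySem.Str.strip case)

-- ===== PRECONDITION & SPEC =====
def pvShellTokens : List String :=
  ["s", "p", "p12", "p32", "t2g", "d", "d32", "d52", "f", "f52", "f72"]

-- Pre_ excludes exactly the inputs whose stripped value is not a valid shell name
-- (a token or a concatenation of two tokens): there Python A raises KeyError
-- (and Python B raises KeyError too).
def Pre_case_to_shell_name (case : String) : Prop :=
  (PySem.Str.strip case) ∈ pvShellTokens ∨
    ∃ a ∈ pvShellTokens, ∃ b ∈ pvShellTokens, PySem.Str.strip case = a ++ b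
instance (case : String) : Decidable (Pre_case_to_shell_name case) := by
  unfold Pre_case_to_shell_name; infer_instance

def pvWitness_case_to_shell_name : String := " t2g "

def Spec_case_to_shell_name (case : String) (out : List String) : Prop := out = case_to_shell_name_alt case
instance (case : String) (out : List String) : Decidable (Spec_case_to_shell_name case out) := by unfold Spec_case_to_shell_name; infer_instance

-- ===== CLAIM (what is proved, stated in full; the proofs are below) =====
def Claim_equal_case_to_shell_name : Prop := ∀ (case : String), Dom_case_to_shell_name case → Pre_case_to_shell_name case → Spec_case_to_shell_name case (case_to_shell_name case)

-- ===== LEMMAS AND PROOFS =====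

-- The dict A builds, written out as a literal (insertion order; no key is inserted twice).
def pvDictLit : PySem.Dict String (List String) := PySem.Dict.mk [("s", ["s"]), ("p", ["p"]), ("p12", ["p12"]), ("p32", ["p32"]), ("t2g", ["t2g"]), ("d", ["d"]), ("d32", ["d32"]), ("d52", ["d52"]), ("f", ["f"]), ("f52", ["f52"]), ("f72", ["f72"]), ("ss", ["s", "s"]), ("sp", ["s", "p"]), ("sp12", ["s", "p12"]), ("sp32", ["s", "p32"]), ("st2g", ["s", "t2g"]), ("sd", ["s", "d"]), ("sd32", ["s", "d32"]), ("sd52", ["s", "d52"]), ("sf", ["s", "f"]), ("sf52", ["s", "f52"]), ("sf72", ["s", "f72"]), ("ps", ["p", "s"]), ("pp", ["p", "p"]), ("pp12", ["p", "p12"]), ("pp32", ["p", "p32"]), ("pt2g", ["p", "t2g"]), ("pd", ["p", "d"]), ("pd32", ["p", "d32"]), ("pd52", ["p", "d52"]), ("pf", ["p", "f"]), ("pf52", ["p", "f52"]), ("pf72", ["p", "f72"]), ("p12s", ["p12", "s"]), ("p12p", ["p12", "p"]), ("p12p12", ["p12", "p12"]), ("p12p32", ["p12", "p32"]), ("p12t2g",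 ["p12", "t2g"]), ("p12d", ["p12", "d"]), ("p12d32", ["p12", "d32"]), ("p12d52", ["p12", "d52"]), ("p12f", ["p12", "f"]), ("p12f52", ["p12", "f52"]), ("p12f72", ["p12", "f72"]), ("p32s", ["p32", "s"]), ("p32p", ["p32", "p"]), ("p32p12", ["p32", "p12"]), ("p32p32", ["p32", "p32"]), ("p32t2g", ["p32", "t2g"]), ("p32d", ["p32", "d"]), ("p32d32", ["p32", "d32"]), ("p32d52", ["p32", "d52"]), ("p32f", ["p32", "f"]), ("p32f52", ["p32", "f52"]), ("p32f72", ["p32", "f72"]), ("t2gs", ["t2g", "s"]), ("t2gp", ["t2g", "p"]), ("t2gp12", ["t2g", "p12"]), ("t2gp32", ["t2g", "p32"]), ("t2gt2g", ["t2g", "t2g"]), ("t2gd", ["t2g", "d"]), ("t2gd32", ["t2g", "d32"]), ("t2gd52", ["t2g", "d52"]), ("t2gf", ["t2g", "f"]), ("t2gf52", ["t2g", "f52"]), ("t2gf72", ["t2g", "f72"]), ("ds", ["d", "s"]), ("dp", ["d", "p"]), ("dp12", ["d", "p12"]), ("dp32", ["d", "p32"]), ("dt2g", ["d", "t2g"]),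 ("dd", ["d", "d"]), ("dd32", ["d", "d32"]), ("dd52", ["d", "d52"]), ("df", ["d", "f"]), ("df52", ["d", "f52"]), ("df72", ["d", "f72"]), ("d32s", ["d32", "s"]), ("d32p", ["d32", "p"]), ("d32p12", ["d32", "p12"]), ("d32p32", ["d32", "p32"]), ("d32t2g", ["d32", "t2g"]), ("d32d", ["d32", "d"]), ("d32d32", ["d32", "d32"]), ("d32d52", ["d32", "d52"]), ("d32f", ["d32", "f"]), ("d32f52", ["d32", "f52"]), ("d32f72", ["d32", "f72"]), ("d52s", ["d52", "s"]), ("d52p", ["d52", "p"]), ("d52p12", ["d52", "p12"]), ("d52p32", ["d52", "p32"]), ("d52t2g", ["d52", "t2g"]), ("d52d", ["d52", "d"]), ("d52d32", ["d52", "d32"]), ("d52d52", ["d52", "d52"]), ("d52f", ["d52", "f"]), ("d52f52", ["d52", "f52"]), ("d52f72", ["d52", "f72"]), ("fs", ["f", "s"]), ("fp", ["f", "p"]), ("fp12", ["f", "p12"]), ("fp32", ["f", "p32"]), ("ft2g", ["f", "t2g"]), ("fd", ["f", "d"]), ("fd32", ["f", "d32"]), ("fd52", ["f", "d52"]), ("ff",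 ["f", "f"]), ("ff52", ["f", "f52"]), ("ff72", ["f", "f72"]), ("f52s", ["f52", "s"]), ("f52p", ["f52", "p"]), ("f52p12", ["f52", "p12"]), ("f52p32", ["f52", "p32"]), ("f52t2g", ["f52", "t2g"]), ("f52d", ["f52", "d"]), ("f52d32", ["f52", "d32"]), ("f52d52", ["f52", "d52"]), ("f52f", ["f52", "f"]), ("f52f52", ["f52", "f52"]), ("f52f72", ["f52", "f72"]), ("f72s", ["f72", "s"]), ("f72p", ["f72", "p"]), ("f72p12", ["f72", "p12"]), ("f72p32", ["f72", "p32"]), ("f72t2g", ["f72", "t2g"]), ("f72d", ["f72", "d"]), ("f72d32", ["f72", "d32"]), ("f72d52", ["f72", "d52"]), ("f72f", ["f72", "f"]), ("f72f52", ["f72", "f52"]), ("f72f72", ["f72", "f72"])]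

set_option maxRecDepth 40000 in
theorem pvDictA_eq :
    (let shell : List String := ["s", "p", "p12", "p32", "t2g", "d", "d32", "d52", "f", "f52", "f72"]
     let d0 : PySem.Dict String (List String) :=
       shell.foldl (fun d str1 => d.insert str1 [str1]) PySem.Dict.empty
     shell.foldl (fun d str1 =>
       shell.foldl (fun d str2 => d.insert (str1 ++ str2) [str1, str2]) d) d0) = pvDictLit := by
  decide

set_option maxRecDepth 40000 in
theorem portA_eq (case : String) :
    case_to_shell_name case = (pvDictLit.get? (PySem.Str.strip case)).getD [] := by
  exact congrArg (fun d => (PySem.Dict.get? d (PySem.Str.strip case)).getD []) pvDictA_eq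

-- every key Pre_ admits, and agreement of the two computations on all of them
def pvAllKeys : List String :=
  pvShellTokens ++ pvShellTokens.flatMap (fun a => pvShellTokens.map (fun b => a ++ b))

set_option maxRecDepth 100000 in
theorem agree_on_keys :
    ∀ k ∈ pvAllKeys, (pvDictLit.get? k).getD [] = pvParse k := by
  decide

-- ===== VERDICT (by name: the statement is the Claim_ definition above) =====
theorem case_to_shell_name_spec : Claim_equal_case_to_shell_name := by
  intro case _ hpre
  unfold Spec_case_to_shell_name case_to_shell_name_alt
  rw [portA_eq]
  have hmem : PySem.Str.strip case ∈ pvAllKeys := by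
    rcases hpre with h | ⟨a, ha, b, hb, h⟩
    · exact List.mem_append_left _ h
    · exact List.mem_append_right _
        (List.mem_flatMap.mpr ⟨a, ha, List.mem_map.mpr ⟨b, hb, h.symm⟩⟩)
  exact agree_on_keys _ hmem
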